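-- pv_equiv track=rewrite | github.com/langchain-ai/story-writing | pages/Story_Writing.py | transform_titles_into_options
-- ===== SOURCE A (Python) =====
-- def transform_titles_into_options(titles):
--     name_counts = {}
--     for name in set(titles):
--         name_counts[name] = titles.count(name)
--
--     # Transform names with numbered suffixes
--     transformed_titles = []
--     for name in titles[::-1]:
--         count = name_counts[name]
--         if count > 1 or titles.count(name) > 1:
--             transformed_titles.append(f"{name} #{count}")
--         else:
--             transformed_titles.append(name)
--         name_counts[name] -= 1
--
--     return transformed_titles[::-1]
-- ===== SOURCE B (Python) =====
-- def transform_titles_into_options(titles):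
--     # Stateless closed form: each element is computed independently from the
--     # total count and its prefix-occurrence count; no dict, no reversal.
--     return [
--         name if titles.count(name) == 1
--         else f"{name} #{titles[: i + 1].count(name)}"
--         for i, name in enumerate(titles)
--     ]
-- ===== Notes on version B (the rewrite author's own statement) =====
-- stated objective: simpler
-- what changed: Replaced A's count-dict plus reversed scan with a decrementing counter (and double reversal) by a single stateless comprehension that labels each element from its prefix-occurrence count.
import Mathlib
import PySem

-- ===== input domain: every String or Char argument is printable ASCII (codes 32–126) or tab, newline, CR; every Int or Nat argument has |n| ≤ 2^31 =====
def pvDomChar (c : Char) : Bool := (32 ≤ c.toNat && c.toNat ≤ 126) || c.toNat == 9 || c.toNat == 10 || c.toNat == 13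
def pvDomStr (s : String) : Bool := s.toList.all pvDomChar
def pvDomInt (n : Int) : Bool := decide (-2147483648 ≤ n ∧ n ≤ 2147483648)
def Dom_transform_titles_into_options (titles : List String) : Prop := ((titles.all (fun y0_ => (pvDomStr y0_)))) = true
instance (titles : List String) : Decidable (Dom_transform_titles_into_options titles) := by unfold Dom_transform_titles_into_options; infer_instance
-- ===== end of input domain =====

-- B replaces A's count-dict + reversed decrementing scan by one stateless per-element
-- comprehension (objective: simpler); return values agree on every input.

-- ===== PORT A =====
-- body of A's 'for name in titles[::-1]' loop; state = (transformed_titles, name_counts)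
def pvAStep (titles : List String) (st : List String × PySem.Dict String Int) (name : String) :
    List String × PySem.Dict String Int :=
  let count := st.2.getD name 0   -- name_counts[name]; the key is always present, so no KeyError
  ((if count > 1 ∨ ((PySem.List.count titles name : Int) > 1)
    then st.1 ++ [name ++ " #" ++ PySem.Int.toStr count]     -- f"{name} #{count}"
    else st.1 ++ [name]),
   st.2.insert name (count - 1))   -- name_counts[name] -= 1

def transform_titles_into_options (titles : List String) : List String :=
  let name_counts : PySem.Dict String Int :=
    (PySem.Set.ofList titles).foldl
      (fun d name => d.insert name ((PySem.List.count titles name : Int))) PySem.Dict.empty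
  -- titles[::-1] is exact list reversal
  let transformed := (titles.reverse).foldl (pvAStep titles) ([], name_counts)
  transformed.1.reverse   -- transformed_titles[::-1]

-- ===== PORT B =====
def transform_titles_into_options_alt (titles : List String) : List String :=
  (PySem.List.enumerate titles).map (fun p =>
    if PySem.List.count titles p.2 == 1 then p.2
    else p.2 ++ " #" ++
      PySem.Int.toStr ((PySem.List.count (PySem.List.slice titles none (some (p.1 + 1))) p.2 : Int)))

-- ===== PRECONDITION & SPEC =====
def Spec_transform_titles_into_options (titles : List String) (out : List String) : Prop := out = transform_titles_into_options_alt titles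
instance (titles : List String) (out : List String) : Decidable (Spec_transform_titles_into_options titles out) := by unfold Spec_transform_titles_into_options; infer_instance

-- ===== CLAIM (what is proved, stated in full; the proofs are below) =====
def Claim_equal_transform_titles_into_options : Prop := ∀ (titles : List String), Dom_transform_titles_into_options titles → Spec_transform_titles_into_options titles (transform_titles_into_options titles)

-- ===== LEMMAS AND PROOFS =====

-- the sequence of labels A emits for suffix l of titles, when u is the part before l
def pvLabels (titles u l : List String) : List String :=
  match l with
  | [] => []
  | x :: t =>
    (if ((u.count x : Int) + 1 > 1 ∨ ((PySem.List.count titles x : Int) > 1))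
     then x ++ " #" ++ PySem.Int.toStr ((u.count x : Int) + 1)
     else x) :: pvLabels titles (u ++ [x]) t

lemma pvGetD_foldl_insert (v : String → Int) :
    ∀ (xs : List String) (d : PySem.Dict String Int) (name : String),
    (xs.foldl (fun d k => d.insert k (v k)) d).getD name 0
      = if name ∈ xs then v name else d.getD name 0 := by
  intro xs
  induction xs with
  | nil => intro d name; simp
  | cons x t ih =>
    intro d name
    simp only [List.foldl_cons, ih, PySem.Dict.getD_insert]
    by_cases hx : name = x <;> by_cases ht : name ∈ t <;> simp [hx, ht]

lemma pvNameCounts (titles : List String) (name : String) :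
    ((PySem.Set.ofList titles).foldl
      (fun d n => d.insert n ((PySem.List.count titles n : Int))) PySem.Dict.empty).getD name 0
      = ((titles.count name : Nat) : Int) := by
  rw [pvGetD_foldl_insert]
  by_cases h : name ∈ titles
  · simp [PySem.Set.mem_ofList, h, PySem.List.count]
  · simp [PySem.Set.mem_ofList, h, List.count_eq_zero_of_not_mem h]

lemma pvLoop (titles : List String) :
    ∀ (l u : List String) (d : PySem.Dict String Int) (acc : List String),
    (∀ name, d.getD name 0 = (((u ++ l).count name : Nat) : Int)) →
    (l.foldr (fun x st => pvAStep titles st x) (acc, d)).1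
        = acc ++ (pvLabels titles u l).reverse
    ∧ ∀ name, (l.foldr (fun x st => pvAStep titles st x) (acc, d)).2.getD name 0
        = ((u.count name : Nat) : Int) := by
  intro l
  induction l with
  | nil =>
    intro u d acc h
    refine ⟨by simp [pvLabels], ?_⟩
    intro name; simpa using h name
  | cons x t ih =>
    intro u d acc h
    have h' : ∀ name, d.getD name 0 = ((((u ++ [x]) ++ t).count name : Nat) : Int) := by
      intro name; simpa using h name
    obtain ⟨ih1, ih2⟩ := ih (u ++ [x]) d acc h'
    simp only [List.foldr_cons]
    set R := t.foldr (fun x st => pvAStep titles st x) (acc, d) with hR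
    have hcx : R.2.getD x 0 = ((u.count x : Nat) : Int) + 1 := by
      rw [ih2 x]; push_cast [List.count_append]; simp
    constructor
    · show (pvAStep titles R x).1 = _
      simp only [pvAStep, hcx, ih1, pvLabels]
      split <;> simp
    · intro name
      show (R.2.insert x (R.2.getD x 0 - 1)).getD name 0 = _
      rw [PySem.Dict.getD_insert]
      by_cases hn : name = x
      · subst hn; rw [hcx]; simp
      · simp only [hn, if_false, ih2 name]
        have hxn : ¬ x = name := fun hc => hn hc.symm
        simp [List.count_append, hxn]

lemma pvTake_middle (u t : List String) (x : String) :
    (u ++ x :: t).take (u.length + 1) = u ++ [x] := by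
  have : u ++ x :: t = (u ++ [x]) ++ t := by simp
  rw [this]
  have hl : u.length + 1 = (u ++ [x]).length := by simp
  rw [hl, List.take_left]

lemma pvLabels_eq (titles : List String) :
    ∀ (l u : List String), titles = u ++ l →
    pvLabels titles u l = (PySem.List.enumerate l (u.length : Int)).map (fun p =>
      if PySem.List.count titles p.2 == 1 then p.2
      else p.2 ++ " #" ++
        PySem.Int.toStr ((PySem.List.count (PySem.List.slice titles none (some (p.1 + 1))) p.2 : Int))) := by
  intro l
  induction l with
  | nil => intro u _; simp [pvLabels, PySem.List.enumerate]
  | cons x t ih =>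
    intro u ht
    have hslice : PySem.List.slice titles none (some ((u.length : Int) + 1))
        = titles.take (u.length + 1) := by
      have hb : (0:Int) ≤ (u.length : Int) + 1 := by omega
      rw [PySem.List.slice_to titles hb]
      congr 1
    have htake : (titles.take (u.length + 1)).count x = u.count x + 1 := by
      rw [ht, pvTake_middle, List.count_append]
      simp
    have hcount : u.count x + 1 ≤ titles.count x := by
      rw [ht, List.count_append]
      have : 1 ≤ (x :: t).count x := by simp [List.count_cons_self]
      omega
    have henum : PySem.List.enumerate (x :: t) (u.length : Int)
        = ((u.length : Int), x) :: PySem.List.enumerate t ((u.length : Int) + 1) := rfl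
    rw [henum]
    simp only [List.map_cons, pvLabels]
    congr 1
    · -- head labels agree
      simp only [hslice]
      by_cases h1 : titles.count x = 1
      · have hu : u.count x = 0 := by omega
        simp [PySem.List.count, h1, hu]
      · have h2 : 1 < titles.count x := by
          have : 1 ≤ titles.count x := by omega
          omega
        have hcond : ((u.count x : Int) + 1 > 1 ∨ ((PySem.List.count titles x : Int) > 1)) := by
          right; simp [PySem.List.count]; exact_mod_cast h2
        rw [if_pos hcond, if_neg (by simp [PySem.List.count, h1])]
        have : ((((titles.take (u.length + 1)).count x : Nat)) : Int) = (u.count x : Int) + 1 := by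
          rw [htake]; push_cast; ring
        simp [PySem.List.count, this]
    · -- tails agree
      have ht' : titles = (u ++ [x]) ++ t := by simp [ht]
      have hlen : (((u ++ [x]).length : Nat) : Int) = (u.length : Int) + 1 := by
        simp
      rw [ih (u ++ [x]) ht', hlen]

-- ===== VERDICT (by name: the statement is the Claim_ definition above) =====
theorem transform_titles_into_options_spec : Claim_equal_transform_titles_into_options := by
  intro titles _
  show transform_titles_into_options titles = transform_titles_into_options_alt titles
  have hA : transform_titles_into_options titles
      = ((titles.foldr (fun x st => pvAStep titles st x)
          ([], (PySem.Set.ofList titles).foldl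
            (fun d n => d.insert n ((PySem.List.count titles n : Int))) PySem.Dict.empty)).1).reverse := by
    simp [transform_titles_into_options, List.foldl_reverse]
  rw [hA]
  have h0 : ∀ name,
      ((PySem.Set.ofList titles).foldl
        (fun d n => d.insert n ((PySem.List.count titles n : Int))) PySem.Dict.empty).getD name 0
      = (((([] : List String) ++ titles).count name : Nat) : Int) := by
    intro name; simpa using pvNameCounts titles name
  obtain ⟨h1, _⟩ := pvLoop titles titles [] _ [] h0
  rw [h1]
  simp only [List.nil_append, List.reverse_reverse]
  have := pvLabels_eq titles titles [] rfl
  simpa [transform_titles_into_options_alt] using this
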